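-- pv_equiv track=rewrite | github.com/VISHNUAJI2002/Basic-coding-practice | Arrays/reverse_alternate_from_second.py | rev_alternate_from_second
-- ===== SOURCE A (Python) =====
-- def rev_alternate_from_second(nums):
--     n=len(nums)
--     alternate=nums[1::2][::-1]
--     j=0
--     for i in range(1,n,2):
--         nums[i]=alternate[j]
--         j+=1
--     return nums
-- ===== SOURCE B (Python) =====
-- def rev_alternate_from_second(nums):
--     n = len(nums)
--     last = n - 1 if (n - 1) % 2 == 1 else n - 2
--     i, j = 1, last
--     while i < j:
--         nums[i], nums[j] = nums[j], nums[i]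
--         i += 2
--         j -= 2
--     return nums
-- ===== Notes on version B (the rewrite author's own statement) =====
-- stated objective: alternative
-- what changed: Replaces A's 'build a reversed copy of the odd-index slice, then copy it back over the odd positions' with a converging two-pointer in-place swap over the odd indices, using no auxiliary list.
import Mathlib
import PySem

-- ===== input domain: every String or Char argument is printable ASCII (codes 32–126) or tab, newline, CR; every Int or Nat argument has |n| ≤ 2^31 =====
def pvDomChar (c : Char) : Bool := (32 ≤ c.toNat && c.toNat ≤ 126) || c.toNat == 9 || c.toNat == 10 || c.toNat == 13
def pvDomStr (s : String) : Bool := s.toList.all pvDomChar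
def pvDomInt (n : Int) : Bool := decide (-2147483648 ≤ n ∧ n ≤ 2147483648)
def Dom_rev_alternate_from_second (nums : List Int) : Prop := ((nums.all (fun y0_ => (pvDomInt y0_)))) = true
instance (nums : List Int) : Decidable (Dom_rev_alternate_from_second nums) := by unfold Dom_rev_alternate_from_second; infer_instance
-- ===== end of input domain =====

-- B replaces A's reversed odd-index slice + copy-back with a two-pointer in-place swap over the odd
-- positions (objective: alternative; no auxiliary list).  A mutates its argument in place and B performs
-- the same mutation in Python; the equivalence proved here is about the return value.

-- ===== PORT A =====
def rev_alternate_from_second (nums : List Int) : List Int :=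
  let n : Int := (nums.length : Int)
  -- alternate = nums[1::2][::-1]
  let alternate : List Int :=
    (PySem.List.slice? ((PySem.List.slice? nums (some 1) none 2).getD []) none none (-1)).getD []
  -- j = 0; for i in range(1, n, 2): nums[i] = alternate[j]; j += 1
  let r := (PySem.List.pyRange 1 n 2).foldl
    (fun (st : List Int × Int) i =>
      (PySem.List.pySetD st.1 i (PySem.List.pyGetD alternate st.2 0), st.2 + 1))
    (nums, 0)
  r.1

-- ===== PORT B =====
-- while i < j: nums[i], nums[j] = nums[j], nums[i]; i += 2; j -= 2
def pvSwapLoop (lst : List Int) (i j : Int) : List Int :=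
  if i < j then
    pvSwapLoop
      (PySem.List.pySetD (PySem.List.pySetD lst i (PySem.List.pyGetD lst j 0)) j
        (PySem.List.pyGetD lst i 0))
      (i + 2) (j - 2)
  else lst
termination_by (j - i).toNat
decreasing_by omega

def rev_alternate_from_second_alt (nums : List Int) : List Int :=
  let n : Int := (nums.length : Int)
  let last : Int := if PySem.Int.mod (n - 1) 2 = 1 then n - 1 else n - 2
  pvSwapLoop nums 1 last

-- ===== PRECONDITION & SPEC =====
def Spec_rev_alternate_from_second (nums : List Int) (out : List Int) : Prop := out = rev_alternate_from_second_alt nums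
instance (nums : List Int) (out : List Int) : Decidable (Spec_rev_alternate_from_second nums out) := by unfold Spec_rev_alternate_from_second; infer_instance

-- ===== CLAIM (what is proved, stated in full; the proofs are below) =====
def Claim_equal_rev_alternate_from_second : Prop := ∀ (nums : List Int), Dom_rev_alternate_from_second nums → Spec_rev_alternate_from_second nums (rev_alternate_from_second nums)

-- ===== LEMMAS AND PROOFS =====

-- nums[1::2] is the list of odd-position elements, written by index.
theorem pv_odds (nums : List Int) :
    PySem.List.slice? nums (some 1) none 2
      = some ((List.range (nums.length / 2)).map (fun k => nums.getD (1 + 2 * k) 0)) := by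
  simp only [PySem.List.slice?, PySem.List.sliceIndices]
  norm_num
  have hcount : (if 1 < nums.length
      then (((nums.length : Int) - min 1 ↑nums.length + 2 - 1) / 2).toNat else 0)
      = nums.length / 2 := by split_ifs with h <;> omega
  rw [hcount]
  apply List.filterMap_eq_map_iff_forall_eq_some.mpr
  intro k hk
  rw [List.mem_range] at hk
  have h1 : (min 1 (nums.length : Int) + 2 * (k : Int)).toNat = 1 + 2 * k := by omega
  rw [h1, List.getElem?_eq_getElem (by omega)]
  rfl

-- A’s copy-back loop, folded over `List.range c`.
def pvFoldA (alt : List Int) (c : Nat) (st0 : List Int × Int) : List Int × Int :=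
  (List.range c).foldl
    (fun st (k : Nat) =>
      (PySem.List.pySetD st.1 (1 + 2 * (k : Int)) (PySem.List.pyGetD alt st.2 0), st.2 + 1))
    st0


theorem pv_foldA_spec (alt : List Int) (c : Nat) (lst : List Int) (j0 : Int)
    (hc : 2 * c ≤ lst.length) :
    (pvFoldA alt c (lst, j0)).2 = j0 + c ∧
    (pvFoldA alt c (lst, j0)).1.length = lst.length ∧
    (∀ p : Nat, p % 2 = 0 ∨ 2 * c ≤ p → (pvFoldA alt c (lst, j0)).1.getD p 0 = lst.getD p 0) ∧
    (∀ k : Nat, k < c →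
      (pvFoldA alt c (lst, j0)).1.getD (1 + 2 * k) 0 = PySem.List.pyGetD alt (j0 + k) 0) := by
  induction c with
  | zero => simp [pvFoldA]
  | succ c ih =>
    obtain ⟨ha, hb, hu, hd⟩ := ih (by omega)
    have hstep : pvFoldA alt (c + 1) (lst, j0)
        = (PySem.List.pySetD (pvFoldA alt c (lst, j0)).1 (1 + 2 * (c : Int))
            (PySem.List.pyGetD alt (pvFoldA alt c (lst, j0)).2 0),
           (pvFoldA alt c (lst, j0)).2 + 1) := by
      simp [pvFoldA, List.range_succ]
    have hcast : (1 + 2 * (c : Int)) = ((1 + 2 * c : Nat) : Int) := by push_cast; ring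
    have hset : PySem.List.pySetD (pvFoldA alt c (lst, j0)).1 (1 + 2 * (c : Int))
        (PySem.List.pyGetD alt (pvFoldA alt c (lst, j0)).2 0)
        = (pvFoldA alt c (lst, j0)).1.set (1 + 2 * c)
            (PySem.List.pyGetD alt (pvFoldA alt c (lst, j0)).2 0) := by
      rw [hcast, PySem.List.pySetD_natCast]
    rw [hstep]
    refine ⟨by simpa using by omega, ?_, ?_, ?_⟩
    · simp [hset, hb]
    · intro p hp
      rw [hset]
      have hne : 1 + 2 * c ≠ p := by omega
      simp only [List.getD, List.getElem?_set_ne hne]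
      exact hu p (by omega)
    · intro k hk
      rw [hset, ha]
      by_cases hkc : k = c
      · subst hkc
        have hlen : 1 + 2 * k < (pvFoldA alt k (lst, j0)).1.length := by omega
        simp [List.getD, hlen]
      · have hne : 1 + 2 * c ≠ 1 + 2 * k := by omega
        simp only [List.getD, List.getElem?_set_ne hne]
        exact hd k (by omega)

-- B’s swap loop reverses the arithmetic progression of odd indices between i and j.
theorem pv_swapLoop_spec (lst : List Int) (i j : Int) (hi : 1 ≤ i) (hi2 : i % 2 = 1)
    (hj2 : j % 2 = 1) (hj : j < (lst.length : Int)) :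
    (pvSwapLoop lst i j).length = lst.length ∧
    ∀ p : Nat, p < lst.length →
      (pvSwapLoop lst i j).getD p 0 =
        if i ≤ (p : Int) ∧ (p : Int) ≤ j ∧ p % 2 = 1
        then lst.getD (i + j - p).toNat 0 else lst.getD p 0 := by
  by_cases h : i < j
  · have hj0 : 0 ≤ j := by omega
    have hjlt : j.toNat < lst.length := by omega
    have hilt : i.toNat < lst.length := by omega
    -- the swapped list
    have hset : PySem.List.pySetD (PySem.List.pySetD lst i (PySem.List.pyGetD lst j 0)) j
        (PySem.List.pyGetD lst i 0)
        = (lst.set i.toNat (lst.getD j.toNat 0)).set j.toNat (lst.getD i.toNat 0) := by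
      rw [PySem.List.pySetD_of_nonneg _ _ (by omega), PySem.List.pySetD_of_nonneg _ _ (by omega),
        PySem.List.pyGetD_eq_getElem _ _ (by omega) (by omega),
        PySem.List.pyGetD_eq_getElem _ _ (by omega) (by omega),
        List.getD_eq_getElem _ _ hjlt, List.getD_eq_getElem _ _ hilt]
    set lst' := (lst.set i.toNat (lst.getD j.toNat 0)).set j.toNat (lst.getD i.toNat 0) with hlst'
    have hlen' : lst'.length = lst.length := by simp [hlst']
    have hget' : ∀ q : Nat, q < lst.length → lst'.getD q 0 =
        if (q : Int) = j then lst.getD i.toNat 0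
        else if (q : Int) = i then lst.getD j.toNat 0
        else lst.getD q 0 := by
      intro q hq
      by_cases hqj : (q : Int) = j
      · have : q = j.toNat := by omega
        subst this
        simp only [if_pos hqj, hlst', List.getD]
        rw [List.getElem?_set_self (by simpa using hjlt)]
        rfl
      · have hne : j.toNat ≠ q := by omega
        rw [hlst']
        simp only [List.getD, List.getElem?_set_ne hne, if_neg hqj]
        by_cases hqi : (q : Int) = i
        · have : q = i.toNat := by omega
          subst this
          rw [List.getElem?_set_self hilt, if_pos hqi]
          rfl
        · have hne2 : i.toNat ≠ q := by omega
          rw [List.getElem?_set_ne hne2, if_neg hqi]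
    have ih := pv_swapLoop_spec lst' (i + 2) (j - 2) (by omega) (by omega) (by omega)
      (by omega)
    obtain ⟨ihlen, ihget⟩ := ih
    have hunf : pvSwapLoop lst i j = pvSwapLoop lst' (i + 2) (j - 2) := by
      rw [pvSwapLoop, if_pos h, hset]
    rw [hunf]
    refine ⟨by omega, ?_⟩
    intro p hp
    rw [ihget p (by omega)]
    by_cases hc : i ≤ (p : Int) ∧ (p : Int) ≤ j ∧ p % 2 = 1
    · rw [if_pos hc]
      obtain ⟨h1, h2, h3⟩ := hc
      by_cases hpi : (p : Int) = i
      · -- p = i : untouched by the recursion, reads lst'[i] = lst[j]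
        rw [if_neg (by omega), hget' p (by omega), if_neg (by omega), if_pos hpi]
        congr 1
        omega
      · by_cases hpj : (p : Int) = j
        · rw [if_neg (by omega), hget' p (by omega), if_pos hpj]
          congr 1
          omega
        · -- interior: i+2 ≤ p ≤ j-2  (parity: p - i is even)
          have hpar : (p : Int) % 2 = 1 := by omega
          have hin : i + 2 ≤ (p : Int) ∧ (p : Int) ≤ j - 2 := by omega
          rw [if_pos ⟨hin.1, hin.2, h3⟩]
          have hmq : (i + 2 + (j - 2) - (p : Int)) = i + j - p := by ring
          rw [hmq, hget' (i + j - p).toNat (by omega)]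
          rw [if_neg (by omega), if_neg (by omega)]
    · rw [if_neg hc]
      have hc' : ¬ (i + 2 ≤ (p : Int) ∧ (p : Int) ≤ j - 2 ∧ p % 2 = 1) := by omega
      rw [if_neg hc', hget' p (by omega), if_neg (by omega), if_neg (by omega)]
  · refine ⟨by rw [pvSwapLoop, if_neg h], ?_⟩
    intro p hp
    rw [pvSwapLoop, if_neg h]
    by_cases hc : i ≤ (p : Int) ∧ (p : Int) ≤ j ∧ p % 2 = 1
    · rw [if_pos hc]
      congr 1
      omega
    · rw [if_neg hc]
termination_by (j - i).toNat
decreasing_by omega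

-- A computes the copy-back fold over the reversed odd slice.
theorem pv_A_eq (nums : List Int) :
    rev_alternate_from_second nums
      = (pvFoldA ((List.range (nums.length / 2)).map (fun k => nums.getD (1 + 2 * k) 0)).reverse
          (nums.length / 2) (nums, 0)).1 := by
  simp only [rev_alternate_from_second, pv_odds, Option.getD_some,
    PySem.List.slice?_none_none_neg_one]
  rw [PySem.List.pyRange_of_pos 1 (nums.length : Int) (by norm_num)]
  have hcount : (if (1:Int) < (nums.length : Int)
      then (((nums.length : Int) - 1 + 2 - 1) / 2).toNat else 0) = nums.length / 2 := by
    split_ifs <;> omega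
  rw [hcount]
  rw [List.foldl_map]
  unfold pvFoldA
  rfl

-- B runs the swap loop from 1 to the last odd index 2*(n/2) - 1.
theorem pv_B_eq (nums : List Int) :
    rev_alternate_from_second_alt nums
      = pvSwapLoop nums 1 (2 * ((nums.length / 2 : Nat) : Int) - 1) := by
  simp only [rev_alternate_from_second_alt]
  congr 1
  rw [PySem.Int.mod_eq_emod_of_pos (by norm_num)]
  split_ifs with h <;> omega

theorem rev_alternate_from_second_eq_alt (nums : List Int) :
    rev_alternate_from_second nums = rev_alternate_from_second_alt nums := by
  have hm2 : 2 * (nums.length / 2) ≤ nums.length := by omega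
  have hA := pv_foldA_spec
    ((List.range (nums.length / 2)).map (fun k => nums.getD (1 + 2 * k) 0)).reverse
    (nums.length / 2) nums 0 hm2
  obtain ⟨-, hAlen, hAu, hAd⟩ := hA
  have hB := pv_swapLoop_spec nums 1 (2 * ((nums.length / 2 : Nat) : Int) - 1) (by omega)
    (by omega) (by omega) (by omega)
  obtain ⟨hBlen, hBget⟩ := hB
  rw [pv_A_eq, pv_B_eq]
  apply List.ext_getElem (by omega)
  intro p hp1 hp2
  rw [← List.getD_eq_getElem _ 0 hp1, ← List.getD_eq_getElem _ 0 hp2]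
  rw [hBget p (by omega)]
  by_cases hpar : p % 2 = 1
  · -- odd position: both sides read nums at the mirrored odd index 2*(n/2) - p
    have hplt : p < nums.length := by omega
    have hpm : p < 2 * (nums.length / 2) := by omega
    set k := p / 2 with hk
    have hpk : p = 1 + 2 * k := by omega
    have hkm : k < nums.length / 2 := by omega
    rw [if_pos ⟨by omega, by omega, hpar⟩, hpk, hAd k hkm]
    have hcast : ((0 : Int) + (k : Int)) = ((k : Nat) : Int) := by omega
    rw [hcast, PySem.List.pyGetD_natCast]
    have hklt : k < (((List.range (nums.length / 2)).map
        (fun k => nums.getD (1 + 2 * k) 0)).reverse).length := by simpa using hkm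
    rw [List.getD_eq_getElem _ 0 hklt]
    simp only [List.getElem_reverse, List.getElem_map, List.getElem_range, List.length_map,
      List.length_range]
    congr 1
    omega
  · -- even position: untouched on both sides
    rw [if_neg (by omega)]
    exact hAu p (by omega)

-- ===== VERDICT (by name: the statement is the Claim_ definition above) =====
theorem rev_alternate_from_second_spec : Claim_equal_rev_alternate_from_second := by
  intro nums _
  unfold Spec_rev_alternate_from_second
  exact rev_alternate_from_second_eq_alt nums
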